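-- pv_equiv track=rewrite | github.com/GavinGuan95/Punctuator.Pytorch | data/ted_transcript.py | find_min_max_index
-- ===== SOURCE A (Python) =====
-- import bisect
--
-- def find_min_max_index(alignment, online_transcript):
--     # Find all index in that have alignment[0] and [1] the same
--     alignment_index = []
--     for i, (x, y) in enumerate(zip(alignment[0], alignment[1])):
--         if x == y:
--             alignment_index.append(i)
--     punc_transcript_with_dash = alignment[0][min(alignment_index):(max(alignment_index) + 1)]
--
--     # Find the index of all dashes
--     dash_index = []
--     for i, x in enumerate(alignment[0]):
--         if x == "-":
--             dash_index.append(i)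
--
--     # Find the actual index of alignment, after excluding the effect of dashes
--     new_alignment_index = []
--     for match_idx in alignment_index:
--         dash_before_me = bisect.bisect_left(dash_index, match_idx)
--         new_alignment_index.append(match_idx - dash_before_me)
--
--     # Find the index of the punc_transcript in the original online_transcript
--     min_index = min(new_alignment_index)
--     max_index = max(new_alignment_index)
--
--     punc_transcript = punc_transcript_with_dash.replace("-", "")
--
--     return min_index, max_index, punc_transcript
-- ===== SOURCE B (Python) =====
-- def find_min_max_index(alignment, online_transcript):
--     # One pass over the aligned pair: track the first/last match position together
--     # with the number of dashes seen before each; no bisect, no index lists.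
--     a0, a1 = alignment[0], alignment[1]
--     first = last = None
--     dashes = 0
--     for i, (x, y) in enumerate(zip(a0, a1)):
--         if x == y:
--             if first is None:
--                 first = (i, dashes)
--             last = (i, dashes)
--         if x == '-':
--             dashes += 1
--     punc_transcript = a0[first[0]:last[0] + 1].replace("-", "")
--     return first[0] - first[1], last[0] - last[1], punc_transcript
-- ===== Notes on version B (the rewrite author's own statement) =====
-- stated objective: alternative
-- what changed: Replaces the three index lists plus per-match bisect and four min/max passes with a single pass over the aligned pair that tracks the first and last match position together with a running dash count.
import Mathlib
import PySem

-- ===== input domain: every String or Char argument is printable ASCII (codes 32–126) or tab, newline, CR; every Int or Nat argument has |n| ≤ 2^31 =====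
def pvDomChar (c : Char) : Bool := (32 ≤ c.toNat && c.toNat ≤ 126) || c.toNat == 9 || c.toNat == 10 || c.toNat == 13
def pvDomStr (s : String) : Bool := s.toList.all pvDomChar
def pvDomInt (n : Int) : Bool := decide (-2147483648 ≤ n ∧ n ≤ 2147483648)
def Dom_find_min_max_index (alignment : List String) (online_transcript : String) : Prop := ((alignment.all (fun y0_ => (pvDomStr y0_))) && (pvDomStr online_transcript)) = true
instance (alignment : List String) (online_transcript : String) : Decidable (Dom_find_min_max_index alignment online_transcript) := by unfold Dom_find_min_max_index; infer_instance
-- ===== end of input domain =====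

-- B replaces A's three index lists + per-match bisect + min/max passes by one pass
-- tracking first/last match with a running dash count (objective: alternative).

-- ===== PORT A =====
-- literal transliteration of A; the `match … | none` junk branches are exactly where the
-- Python raises (IndexError on alignment[0]/[1], ValueError on min/max of an empty list)
-- and are excluded by Pre_.
def find_min_max_index (alignment : List String) (online_transcript : String) : Int × Int × String :=
  match PySem.List.pyGet? alignment 0, PySem.List.pyGet? alignment 1 with
  | some a0, some a1 =>
    let alignment_index : List Int :=
      (PySem.List.enumerate (a0.toList.zip a1.toList) 0).foldl
        (fun acc q => if q.2.1 == q.2.2 then acc ++ [q.1] else acc) []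
    match PySem.List.min? alignment_index (fun x => x), PySem.List.max? alignment_index (fun x => x) with
    | some mn, some mx =>
      let punc_transcript_with_dash := PySem.Str.slice a0 (some mn) (some (mx + 1))
      let dash_index : List Int :=
        (PySem.List.enumerate a0.toList 0).foldl
          (fun acc q => if q.2 == '-' then acc ++ [q.1] else acc) []
      let new_alignment_index :=
        alignment_index.map (fun m => m - (PySem.List.bisectLeft dash_index m : Int))
      match PySem.List.min? new_alignment_index (fun x => x), PySem.List.max? new_alignment_index (fun x => x) with
      | some min_index, some max_index =>
        (min_index, max_index, PySem.Str.replace punc_transcript_with_dash "-" "")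
      | _, _ => (0, 0, "")
    | _, _ => (0, 0, "")
  | _, _ => (0, 0, "")

-- ===== PORT B =====
-- literal transliteration of Source B; state = (first, last, dashes); junk branches = where Source B raises.
def find_min_max_index_alt (alignment : List String) (online_transcript : String) : Int × Int × String :=
  match PySem.List.pyGet? alignment 0 with
  | none => (0, 0, "")
  | some a0 =>
  match PySem.List.pyGet? alignment 1 with
  | none => (0, 0, "")
  | some a1 =>
    let st :=
      (PySem.List.enumerate (a0.toList.zip a1.toList) 0).foldl
        (fun (st : Option (Int × Int) × Option (Int × Int) × Int) q =>
          let st1 :=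
            if q.2.1 == q.2.2 then
              ((match st.1 with | none => some (q.1, st.2.2) | some f => some f),
               some (q.1, st.2.2), st.2.2)
            else st
          if q.2.1 == '-' then (st1.1, st1.2.1, st1.2.2 + 1) else st1)
        (none, none, 0)
    match st.1 with
    | none => (0, 0, "")
    | some first =>
    match st.2.1 with
    | none => (0, 0, "")
    | some last =>
      (first.1 - first.2, last.1 - last.2,
       PySem.Str.replace (PySem.Str.slice a0 (some first.1) (some (last.1 + 1))) "-" "")

-- ===== PRECONDITION & SPEC =====
-- Pre_ excludes exactly the inputs on which A raises: fewer than two strings in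
-- `alignment` (IndexError) or no position where the two strings agree (min of an
-- empty list, ValueError).
def Pre_find_min_max_index (alignment : List String) (online_transcript : String) : Prop :=
  2 ≤ alignment.length ∧
  (((alignment.headD "").toList.zip ((alignment.tail.headD "").toList)).any
    (fun q => q.1 == q.2)) = true
instance (alignment : List String) (online_transcript : String) : Decidable (Pre_find_min_max_index alignment online_transcript) := by unfold Pre_find_min_max_index; infer_instance

def pvWitness_find_min_max_index : List String × String := (["a-b", "axb"], "a b")

def Spec_find_min_max_index (alignment : List String) (online_transcript : String) (out : Int × Int × String) : Prop := out = find_min_max_index_alt alignment online_transcript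
instance (alignment : List String) (online_transcript : String) (out : Int × Int × String) : Decidable (Spec_find_min_max_index alignment online_transcript out) := by unfold Spec_find_min_max_index; infer_instance

-- ===== CLAIM (what is proved, stated in full; the proofs are below) =====
def Claim_equal_find_min_max_index : Prop := ∀ (alignment : List String) (online_transcript : String), Dom_find_min_max_index alignment online_transcript → Pre_find_min_max_index alignment online_transcript → Spec_find_min_max_index alignment online_transcript (find_min_max_index alignment online_transcript)

-- ===== LEMMAS AND PROOFS =====

def pvFm : List (Char × Char) → Int → Int → Option (Int × Int)
  | [], _, _ => none
  | (x, y) :: t, s, d =>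
    if x == y then some (s, d) else pvFm t (s + 1) (d + if x == '-' then 1 else 0)

def pvLm : List (Char × Char) → Int → Int → Option (Int × Int)
  | [], _, _ => none
  | (x, y) :: t, s, d =>
    match pvLm t (s + 1) (d + if x == '-' then 1 else 0) with
    | some r => some r
    | none => if x == y then some (s, d) else none

theorem pvB_fold :
    ∀ (l : List (Char × Char)) (s d : Int) (a b : Option (Int × Int)),
    (PySem.List.enumerate l s).foldl
      (fun (st : Option (Int × Int) × Option (Int × Int) × Int) q =>
        let st1 :=
          if q.2.1 == q.2.2 then
            ((match st.1 with | none => some (q.1, st.2.2) | some f => some f),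
             some (q.1, st.2.2), st.2.2)
          else st
        if q.2.1 == '-' then (st1.1, st1.2.1, st1.2.2 + 1) else st1)
      (a, b, d)
    = ((match a with | some f => some f | none => pvFm l s d),
       (match pvLm l s d with | some r => some r | none => b),
       d + ((l.countP (fun q => q.1 == '-') : Nat) : Int)) := by
  intro l
  induction l with
  | nil =>
    intro s d a b
    simp only [PySem.List.enumerate, List.foldl_nil, pvFm, pvLm, List.countP_nil]
    cases a <;> simp
  | cons q t ih =>
    intro s d a b
    obtain ⟨x, y⟩ := q
    rw [PySem.List.enumerate_cons, List.foldl_cons]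
    by_cases hxy : x == y <;> by_cases hxd : x == '-' <;>
      simp only [pvFm, pvLm, hxy, hxd, List.countP_cons, if_true, if_false, Bool.false_eq_true] <;>
      rw [ih] <;> cases a <;> simp [hxy, hxd] <;>
      first
        | rfl
        | omega
        | (cases hpl : pvLm t (s+1) (d+1) <;> simp [hpl] <;> push_cast <;> omega)
        | (cases hpl : pvLm t (s+1) d <;> simp [hpl] <;> push_cast <;> omega)
        | (constructor <;>
            first
              | (cases hpl : pvLm t (s+1) (d+1) <;> simp [hpl])
              | (cases hpl : pvLm t (s+1) d <;> simp [hpl])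
              | push_cast <;> omega)
def pvIdxOf {α : Type} (p : α → Bool) : List α → Int → List Int
  | [], _ => []
  | x :: t, s => if p x then s :: pvIdxOf p t (s + 1) else pvIdxOf p t (s + 1)

theorem pvIdxOf_foldl {α : Type} (p : α → Bool) :
    ∀ (l : List α) (s : Int) (acc : List Int),
    (PySem.List.enumerate l s).foldl (fun acc q => if p q.2 then acc ++ [q.1] else acc) acc
      = acc ++ pvIdxOf p l s := by
  intro l
  induction l with
  | nil => intro s acc; simp [pvIdxOf, PySem.List.enumerate]
  | cons x t ih =>
    intro s acc
    rw [PySem.List.enumerate_cons]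
    by_cases h : p x
    · simp [List.foldl, h, pvIdxOf, ih]
    · simp [List.foldl, h, pvIdxOf, ih]

theorem pvIdxOf_mem {α : Type} (p : α → Bool) :
    ∀ (l : List α) (s m : Int), m ∈ pvIdxOf p l s → s ≤ m ∧ m < s + l.length := by
  intro l
  induction l with
  | nil => intro s m h; simp [pvIdxOf] at h
  | cons x t ih =>
    intro s m h
    by_cases hp : p x <;> simp [pvIdxOf, hp] at h
    · rcases h with rfl | h
      · simp only [List.length_cons]; omega
      · have := ih (s+1) m h; simp only [List.length_cons]; omega
    · have := ih (s+1) m h; simp only [List.length_cons]; omega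

theorem pvIdxOf_pairwise {α : Type} (p : α → Bool) :
    ∀ (l : List α) (s : Int), (pvIdxOf p l s).Pairwise (· < ·) := by
  intro l
  induction l with
  | nil => intro s; simp [pvIdxOf]
  | cons x t ih =>
    intro s
    by_cases hp : p x <;> simp [pvIdxOf, hp]
    · refine ⟨fun m hm => ?_, ih (s+1)⟩
      have := pvIdxOf_mem p t (s+1) m hm; omega
    · exact ih (s+1)

theorem pvIdxOf_ne_nil {α : Type} (p : α → Bool) :
    ∀ (l : List α) (s : Int), l.any p = true → pvIdxOf p l s ≠ [] := by
  intro l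
  induction l with
  | nil => intro s h; simp at h
  | cons x t ih =>
    intro s h
    by_cases hp : p x <;> simp [pvIdxOf, hp]
    simp [hp] at h
    exact ih (s+1) (List.any_eq_true.mpr (by simpa using h))

theorem pvIdxOf_countP {α : Type} (p : α → Bool) :
    ∀ (l : List α) (s : Int) (k : Nat),
    (pvIdxOf p l s).countP (fun e => decide (e < s + (k : Int))) = (l.take k).countP p := by
  intro l
  induction l with
  | nil => intro s k; simp [pvIdxOf]
  | cons x t ih =>
    intro s k
    match k with
    | 0 =>
      rw [List.countP_eq_zero.mpr]
      · simp
      · intro e he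
        have := pvIdxOf_mem p (x :: t) s e he
        simp; omega
    | Nat.succ k =>
      have hcast : ∀ e : Int, (decide (e < s + ((k+1 : Nat) : Int))) = (decide (e < (s+1) + (k : Int))) := by
        intro e; by_cases h : e < s + ((k+1:Nat):Int) <;> simp [h] <;> omega
      by_cases hp : p x <;>
        simp only [pvIdxOf, hp, if_true, if_false, List.take_succ_cons, List.countP_cons,
          Bool.false_eq_true, ite_false, ite_true] <;>
        simp only [Nat.succ_eq_add_one, funext hcast] <;>
        rw [ih (s+1) k] <;> simp [hp] <;> push_cast <;> omega

theorem pvFm_eq :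
    ∀ (l : List (Char × Char)) (s d : Int),
    pvFm l s d = (pvIdxOf (fun q : Char × Char => q.1 == q.2) l s).head?.map
      (fun m => (m, d + (((l.take (m - s).toNat).countP (fun q => q.1 == '-') : Nat) : Int))) := by
  intro l
  induction l with
  | nil => intro s d; simp [pvFm, pvIdxOf]
  | cons q t ih =>
    intro s d
    obtain ⟨x, y⟩ := q
    by_cases hxy : x == y
    · simp [pvFm, pvIdxOf, hxy]
    · simp only [pvFm, pvIdxOf, hxy, Bool.false_eq_true, if_false]
      rw [ih]
      rcases hh : (pvIdxOf (fun q : Char × Char => q.1 == q.2) t (s+1)).head? with _ | m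
      · simp
      · have hmem : m ∈ pvIdxOf (fun q : Char × Char => q.1 == q.2) t (s+1) :=
          List.mem_of_mem_head? (by rw [hh]; simp)
        have hb := pvIdxOf_mem _ t (s+1) m hmem
        have hk : (m - s).toNat = (m - (s+1)).toNat + 1 := by omega
        simp only [Option.map_some, hk, List.take_succ_cons, List.countP_cons]
        by_cases hxd : x == '-' <;> simp [hxd] <;> push_cast <;> try ring

theorem pvLm_eq :
    ∀ (l : List (Char × Char)) (s d : Int),
    pvLm l s d = (pvIdxOf (fun q : Char × Char => q.1 == q.2) l s).getLast?.map
      (fun m => (m, d + (((l.take (m - s).toNat).countP (fun q => q.1 == '-') : Nat) : Int))) := by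
  intro l
  induction l with
  | nil => intro s d; simp [pvLm, pvIdxOf]
  | cons q t ih =>
    intro s d
    obtain ⟨x, y⟩ := q
    have step : ∀ m ∈ pvIdxOf (fun q : Char × Char => q.1 == q.2) t (s+1),
        (d + (if x == '-' then (1:Int) else 0)) + (((t.take (m - (s+1)).toNat).countP (fun q => q.1 == '-') : Nat) : Int)
          = d + ((((((x,y) :: t).take (m - s).toNat).countP (fun q => q.1 == '-')) : Nat) : Int) := by
      intro m hmem
      have hb := pvIdxOf_mem _ t (s+1) m hmem
      have hk : (m - s).toNat = (m - (s+1)).toNat + 1 := by omega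
      simp only [hk, List.take_succ_cons, List.countP_cons]
      by_cases hxd : x == '-' <;> simp [hxd] <;> push_cast <;> try ring
    rcases hnil : pvIdxOf (fun q : Char × Char => q.1 == q.2) t (s+1) with _ | ⟨m0, tt⟩
    · have hlm : pvLm t (s+1) (d + if x == '-' then 1 else 0) = none := by
        rw [ih]; simp [hnil]
      by_cases hxy : x == y <;>
        simp only [pvLm, pvIdxOf, hxy, if_true, Bool.false_eq_true, if_false, hlm, hnil] <;> simp
    · obtain ⟨mL, hL⟩ : ∃ mL, (m0 :: tt).getLast? = some mL :=
        ⟨_, List.getLast?_eq_some_getLast (l := m0 :: tt) (by simp)⟩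
      have hmemL : mL ∈ pvIdxOf (fun q : Char × Char => q.1 == q.2) t (s+1) := by
        rw [hnil]; exact List.mem_of_getLast? hL
      have hlm : pvLm t (s+1) (d + if x == '-' then 1 else 0)
          = some (mL, d + ((((((x,y) :: t).take (mL - s).toNat).countP (fun q => q.1 == '-')) : Nat) : Int)) := by
        rw [ih, hnil, hL]
        simp only [Option.map_some]
        rw [step mL hmemL]
      by_cases hxy : x == y <;>
        simp only [pvLm, pvIdxOf, hxy, if_true, Bool.false_eq_true, if_false, hlm, hnil] <;>
        simp [List.getLast?_cons_cons, hL]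


theorem pvBisect_sorted (xs : List Int) (h : xs.Pairwise (· < ·)) (x : Int) :
    (PySem.List.bisectLeft xs x : Int) = xs.countP (fun e => decide (e < x)) := by
  obtain ⟨hle, hlt, hge⟩ := PySem.List.bisectLeft_spec xs x (h.imp (fun hab => le_of_lt hab))
  set b := PySem.List.bisectLeft xs x with hb
  have hsplit : xs.countP (fun e => decide (e < x))
      = (xs.take b).countP (fun e => decide (e < x)) + (xs.drop b).countP (fun e => decide (e < x)) := by
    conv_lhs => rw [← List.take_append_drop b xs]
    rw [List.countP_append]
  have h1 : (xs.take b).countP (fun e => decide (e < x)) = (xs.take b).length := by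
    apply List.countP_eq_length.mpr
    intro a ha
    obtain ⟨j, hj, rfl⟩ := List.mem_iff_getElem.mp ha
    rw [List.getElem_take]
    have hjb : j < b := lt_of_lt_of_le hj (by simp)
    simpa using hlt j (by omega) hjb
  have h2 : (xs.drop b).countP (fun e => decide (e < x)) = 0 := by
    apply List.countP_eq_zero.mpr
    intro a ha
    obtain ⟨j, hj, rfl⟩ := List.mem_iff_getElem.mp ha
    rw [List.getElem_drop]
    have := hge (b + j) (by simp at hj; omega) (by omega)
    simp; omega
  rw [hsplit, h1, h2, List.length_take]
  omega

theorem pv_le_getLast? (xs : List Int) (h : xs.Pairwise (· < ·)) :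
    ∀ (g : Int), xs.getLast? = some g → ∀ y ∈ xs, y ≤ g := by
  induction xs with
  | nil => intro g hg; simp at hg
  | cons x t ih =>
    intro g hg y hy
    rcases ht : t with _ | ⟨a, tt⟩
    · subst ht; simp at hg hy; omega
    · subst ht
      rw [List.getLast?_cons_cons] at hg
      have hall := List.pairwise_cons.mp h
      rcases List.mem_cons.mp hy with rfl | hy'
      · have hga : g ∈ a :: tt := List.mem_of_getLast? hg
        exact le_of_lt (hall.1 g hga)
      · exact ih hall.2 g hg y hy'

theorem pv_zipcount (bs : List Char) :
    ∀ (as : List Char) (k : Nat), k ≤ (as.zip bs).length →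
    ((as.zip bs).take k).countP (fun q => q.1 == '-') = (as.take k).countP (fun c => c == '-') := by
  induction bs with
  | nil => intro as k hk; simp at hk; subst hk; simp
  | cons b bt ih =>
    intro as k hk
    cases as with
    | nil => simp
    | cons a at' =>
      cases k with
      | zero => simp
      | succ k =>
        simp only [List.zip_cons_cons, List.take_succ_cons, List.countP_cons]
        rw [ih at' k (by simpa using hk)]

theorem pv_countP_take_le (p : Char → Bool) (xs : List Char) (k1 k2 : Nat) (h : k1 ≤ k2) :
    (xs.take k2).countP p ≤ (xs.take k1).countP p + (k2 - k1) := by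
  have hsplit : xs.take k2 = xs.take k1 ++ (xs.drop k1).take (k2 - k1) := by
    rw [← List.take_add]; congr 1; omega
  rw [hsplit, List.countP_append]
  have := List.countP_le_length (p := p) (l := (xs.drop k1).take (k2 - k1))
  have := List.length_take_le (k2 - k1) (xs.drop k1)
  omega

theorem pv_dashBefore (cs : List Char) (m : Int) (h0 : 0 ≤ m) :
    (PySem.List.bisectLeft (pvIdxOf (fun c => c == '-') cs 0) m : Int)
      = (((cs.take m.toNat).countP (fun c => c == '-') : Nat) : Int) := by
  rw [pvBisect_sorted _ (pvIdxOf_pairwise _ cs 0) m]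
  have hm : m = 0 + ((m.toNat : Nat) : Int) := by omega
  have h := pvIdxOf_countP (fun c : Char => c == '-') cs 0 m.toNat
  rw [← hm] at h
  exact_mod_cast h



-- common reference value both ports are reduced to
def pvRef (s0 s1 : String) : Int × Int × String :=
  let ml := pvIdxOf (fun q : Char × Char => q.1 == q.2) (s0.toList.zip s1.toList) 0
  let m0 := ml.headD 0
  let g := ml.getLastD 0
  (m0 - (((s0.toList.take m0.toNat).countP (fun c => c == '-') : Nat) : Int),
   g - (((s0.toList.take g.toNat).countP (fun c => c == '-') : Nat) : Int),
   PySem.Str.replace (PySem.Str.slice s0 (some m0) (some (g + 1))) "-" "")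

theorem pv_B_eq (s0 s1 : String) (rest : List String) (ot : String)
    (hany : ((s0.toList.zip s1.toList).any (fun q => q.1 == q.2)) = true) :
    find_min_max_index_alt (s0 :: s1 :: rest) ot = pvRef s0 s1 := by
  have hget0 : PySem.List.pyGet? (s0 :: s1 :: rest) (0:Int) = some s0 := by
    have h : (0:Int) ≤ (rest.length:Int) + 1 := by positivity
    simp [PySem.List.pyGet?, PySem.List.pyIdx?, h]
  have hget1 : PySem.List.pyGet? (s0 :: s1 :: rest) (1:Int) = some s1 := by
    simp [PySem.List.pyGet?, PySem.List.pyIdx?]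
  have hne := pvIdxOf_ne_nil (fun q : Char × Char => q.1 == q.2) (s0.toList.zip s1.toList) 0 hany
  rcases hml : pvIdxOf (fun q : Char × Char => q.1 == q.2) (s0.toList.zip s1.toList) 0 with _ | ⟨m0, tl⟩
  · exact absurd hml hne
  obtain ⟨g, hg⟩ : ∃ g, (m0 :: tl).getLast? = some g :=
    ⟨_, List.getLast?_eq_some_getLast (l := m0 :: tl) (by simp)⟩
  have hmemg : g ∈ pvIdxOf (fun q : Char × Char => q.1 == q.2) (s0.toList.zip s1.toList) 0 := by
    rw [hml]; exact List.mem_of_getLast? hg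
  have hmem0 : m0 ∈ pvIdxOf (fun q : Char × Char => q.1 == q.2) (s0.toList.zip s1.toList) 0 := by
    rw [hml]; simp
  have hb0 := pvIdxOf_mem (fun q : Char × Char => q.1 == q.2) _ 0 m0 hmem0
  have hbg := pvIdxOf_mem (fun q : Char × Char => q.1 == q.2) _ 0 g hmemg
  have hfm : pvFm (s0.toList.zip s1.toList) 0 0
      = some (m0, ((( (s0.toList.zip s1.toList).take m0.toNat).countP (fun q => q.1 == '-') : Nat) : Int)) := by
    rw [pvFm_eq, hml]
    simp
  have hlm : pvLm (s0.toList.zip s1.toList) 0 0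
      = some (g, ((( (s0.toList.zip s1.toList).take g.toNat).countP (fun q => q.1 == '-') : Nat) : Int)) := by
    rw [pvLm_eq, hml, hg]
    simp
  simp only [find_min_max_index_alt, hget0, hget1]
  rw [pvB_fold (s0.toList.zip s1.toList) 0 0 none none]
  simp only [hfm, hlm]
  rw [pv_zipcount s1.toList s0.toList m0.toNat (by omega), pv_zipcount s1.toList s0.toList g.toNat (by omega)]
  simp [pvRef, hml, List.getLastD_eq_getLast?, hg]

theorem pv_foldlA1 (l : List (Char × Char)) :
    (PySem.List.enumerate l 0).foldl (fun acc q => if q.2.1 == q.2.2 then acc ++ [q.1] else acc) []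
      = pvIdxOf (fun q : Char × Char => q.1 == q.2) l 0 := by
  simpa using pvIdxOf_foldl (fun q : Char × Char => q.1 == q.2) l 0 []

theorem pv_foldlA2 (cs : List Char) :
    (PySem.List.enumerate cs 0).foldl (fun acc q => if q.2 == '-' then acc ++ [q.1] else acc) []
      = pvIdxOf (fun c : Char => c == '-') cs 0 := by
  simpa using pvIdxOf_foldl (fun c : Char => c == '-') cs 0 []

theorem pv_min?_eq (m : Int) (xs : List Int) (hmem : m ∈ xs) (h : ∀ y ∈ xs, m ≤ y) :
    PySem.List.min? xs (fun x => x) = some m := by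
  rcases hmn : PySem.List.min? xs (fun x => x) with _ | mn
  · rw [PySem.List.min?_eq_none_iff] at hmn
    subst hmn; simp at hmem
  · have h1 := PySem.List.min?_isMin hmn m hmem
    have h2 := h mn (PySem.List.min?_mem hmn)
    have : mn = m := le_antisymm h1 h2
    rw [this]

theorem pv_max?_eq (m : Int) (xs : List Int) (hmem : m ∈ xs) (h : ∀ y ∈ xs, y ≤ m) :
    PySem.List.max? xs (fun x => x) = some m := by
  rcases hmx : PySem.List.max? xs (fun x => x) with _ | mx
  · rw [PySem.List.max?_eq_none_iff] at hmx
    subst hmx; simp at hmem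
  · have h1 := PySem.List.max?_isMax hmx m hmem
    have h2 := h mx (PySem.List.max?_mem hmx)
    have : mx = m := le_antisymm h2 h1
    rw [this]

theorem pv_f_mono (cs : List Char) (m1 m2 : Int) (h0 : 0 ≤ m1) (h12 : m1 ≤ m2) :
    m1 - (PySem.List.bisectLeft (pvIdxOf (fun c : Char => c == '-') cs 0) m1 : Int)
      ≤ m2 - (PySem.List.bisectLeft (pvIdxOf (fun c : Char => c == '-') cs 0) m2 : Int) := by
  rw [pv_dashBefore cs m1 h0, pv_dashBefore cs m2 (by omega)]
  have := pv_countP_take_le (fun c : Char => c == '-') cs m1.toNat m2.toNat (by omega)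
  omega

theorem pv_A_eq (s0 s1 : String) (rest : List String) (ot : String)
    (hany : ((s0.toList.zip s1.toList).any (fun q => q.1 == q.2)) = true) :
    find_min_max_index (s0 :: s1 :: rest) ot = pvRef s0 s1 := by
  have hget0 : PySem.List.pyGet? (s0 :: s1 :: rest) (0:Int) = some s0 := by
    have h : (0:Int) ≤ (rest.length:Int) + 1 := by positivity
    simp [PySem.List.pyGet?, PySem.List.pyIdx?, h]
  have hget1 : PySem.List.pyGet? (s0 :: s1 :: rest) (1:Int) = some s1 := by
    simp [PySem.List.pyGet?, PySem.List.pyIdx?]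
  have hne := pvIdxOf_ne_nil (fun q : Char × Char => q.1 == q.2) (s0.toList.zip s1.toList) 0 hany
  rcases hml : pvIdxOf (fun q : Char × Char => q.1 == q.2) (s0.toList.zip s1.toList) 0 with _ | ⟨m0, tl⟩
  · exact absurd hml hne
  obtain ⟨g, hg⟩ : ∃ g, (m0 :: tl).getLast? = some g :=
    ⟨_, List.getLast?_eq_some_getLast (l := m0 :: tl) (by simp)⟩
  have hpw : (m0 :: tl).Pairwise (· < ·) := by
    rw [← hml]; exact pvIdxOf_pairwise _ _ 0
  have hlow : ∀ y ∈ m0 :: tl, m0 ≤ y := by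
    intro y hy
    rcases List.mem_cons.mp hy with rfl | hy'
    · exact le_refl _
    · exact le_of_lt ((List.pairwise_cons.mp hpw).1 y hy')
  have hhigh : ∀ y ∈ m0 :: tl, y ≤ g := pv_le_getLast? _ hpw g hg
  have hmemg : g ∈ m0 :: tl := List.mem_of_getLast? hg
  have hb0 : 0 ≤ m0 ∧ m0 < 0 + ((s0.toList.zip s1.toList).length : Int) :=
    pvIdxOf_mem (fun q : Char × Char => q.1 == q.2) _ 0 m0 (by rw [hml]; simp)
  -- the de-dashed index map
  have hminml : PySem.List.min? (m0 :: tl) (fun x => x) = some m0 :=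
    pv_min?_eq m0 _ (by simp) hlow
  have hmaxml : PySem.List.max? (m0 :: tl) (fun x => x) = some g :=
    pv_max?_eq g _ hmemg hhigh
  have hminnew : PySem.List.min?
      ((m0 :: tl).map (fun m => m - (PySem.List.bisectLeft (pvIdxOf (fun c : Char => c == '-') s0.toList 0) m : Int)))
      (fun x => x)
      = some (m0 - (PySem.List.bisectLeft (pvIdxOf (fun c : Char => c == '-') s0.toList 0) m0 : Int)) := by
    apply pv_min?_eq
    · exact List.mem_map_of_mem (by simp)
    · intro y hy
      obtain ⟨m, hm, rfl⟩ := List.mem_map.mp hy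
      exact pv_f_mono s0.toList m0 m hb0.1 (hlow m hm)
  have hmaxnew : PySem.List.max?
      ((m0 :: tl).map (fun m => m - (PySem.List.bisectLeft (pvIdxOf (fun c : Char => c == '-') s0.toList 0) m : Int)))
      (fun x => x)
      = some (g - (PySem.List.bisectLeft (pvIdxOf (fun c : Char => c == '-') s0.toList 0) g : Int)) := by
    apply pv_max?_eq
    · exact List.mem_map_of_mem hmemg
    · intro y hy
      obtain ⟨m, hm, rfl⟩ := List.mem_map.mp hy
      have hbm := pvIdxOf_mem (fun q : Char × Char => q.1 == q.2) _ 0 m (by rw [hml]; exact hm)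
      exact pv_f_mono s0.toList m g hbm.1 (hhigh m hm)
  simp only [find_min_max_index, hget0, hget1, pv_foldlA1, pv_foldlA2, hml,
    hminml, hmaxml, hminnew, hmaxnew]
  rw [pv_dashBefore s0.toList m0 hb0.1, pv_dashBefore s0.toList g
    (le_trans hb0.1 (hlow g hmemg))]
  simp [pvRef, hml, List.getLastD_eq_getLast?, hg]

-- ===== VERDICT (by name: the statement is the Claim_ definition above) =====

theorem find_min_max_index_spec : Claim_equal_find_min_max_index := by
  intro alignment ot _hdom hpre
  obtain ⟨hlen, hany⟩ := hpre
  unfold Spec_find_min_max_index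
  cases alignment with
  | nil => simp at hlen
  | cons s0 tl =>
    cases tl with
    | nil => simp at hlen
    | cons s1 rest =>
      have hany' : ((s0.toList.zip s1.toList).any (fun q => q.1 == q.2)) = true := by
        simpa using hany
      rw [pv_A_eq s0 s1 rest ot hany', pv_B_eq s0 s1 rest ot hany']
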